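-- pv_equiv track=rewrite | github.com/juliusdabre/Dashboardforstaff | sa2_house_dashboard.py | _guess_investor_score_col
-- ===== SOURCE A (Python) =====
-- def _guess_investor_score_col(columns) -> str | None:
--     lower_map = {c: str(c).lower() for c in columns}
--     for c, lc in lower_map.items():
--         if lc.strip() in ("investor score", "investors score"):
--             return c
--     candidates = [c for c, lc in lower_map.items() if "investor" in lc and "score" in lc]
--     if candidates:
--         candidates.sort(key=lambda x: len(str(x)))
--         return candidates[0]
--     return None
-- ===== SOURCE B (Python) =====
-- def _guess_investor_score_col(columns) -> str | None:
--     lower_map = {c: str(c).lower() for c in columns}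
--     best = None
--     for c, lc in lower_map.items():
--         if lc.strip() in ("investor score", "investors score"):
--             return c
--         if "investor" in lc and "score" in lc:
--             if best is None or len(str(c)) < len(str(best)):
--                 best = c
--     return best
-- ===== Notes on version B (the rewrite author's own statement) =====
-- stated objective: simpler
-- what changed: Replaced A's collect-candidates-then-stable-sort-by-length pass with a single loop over the lower_map items that returns on an exact-phrase hit and otherwise tracks the first shortest candidate in an accumulator (strict '<' keeps the first of equal-length ties), eliminating the candidate list and the sort.
import Mathlib
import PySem

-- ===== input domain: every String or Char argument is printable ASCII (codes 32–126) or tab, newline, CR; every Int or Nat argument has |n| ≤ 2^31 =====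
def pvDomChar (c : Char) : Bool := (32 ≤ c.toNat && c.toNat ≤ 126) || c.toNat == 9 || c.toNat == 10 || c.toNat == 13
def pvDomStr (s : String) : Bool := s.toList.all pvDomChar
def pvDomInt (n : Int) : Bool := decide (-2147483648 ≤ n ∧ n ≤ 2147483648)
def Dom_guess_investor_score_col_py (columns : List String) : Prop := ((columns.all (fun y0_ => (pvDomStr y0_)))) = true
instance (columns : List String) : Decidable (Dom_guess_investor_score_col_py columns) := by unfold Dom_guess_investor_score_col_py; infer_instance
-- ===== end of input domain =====

-- B replaces A's collect-then-stable-sort-by-length candidate pass with one accumulator-tracking loop (simpler, no sort).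


-- ===== PORT A =====
-- shared with B's port: both Pythons build the same lower_map and use the same two string tests
def pvLowerMap (columns : List String) : PySem.Dict String String :=
  columns.foldl (fun d c => d.insert c (PySem.Str.lower c)) PySem.Dict.empty

def pvExactHit (lc : String) : Bool :=
  PySem.Str.strip lc == "investor score" || PySem.Str.strip lc == "investors score"

def pvCand (lc : String) : Bool :=
  PySem.Str.isIn "investor" lc && PySem.Str.isIn "score" lc

-- A's first loop: return the first exact-phrase key
def pvALoop : List (String × String) → Option String
  | [] => none
  | (c, lc) :: rest => if pvExactHit lc then some c else pvALoop rest

def guess_investor_score_col_py (columns : List String) : Option String :=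
  let items := (pvLowerMap columns).items
  match pvALoop items with
  | some c => some c
  | none =>
    let candidates := (items.filter (fun p => pvCand p.2)).map (·.1)
    if candidates.isEmpty then none
    else (PySem.List.sorted candidates (fun x => PySem.Str.len x) false).head?

-- ===== PORT B =====
-- B's single loop: exact hit returns at once; otherwise keep the first shortest candidate
def pvBLoop : List (String × String) → Option String → Option String
  | [], best => best
  | (c, lc) :: rest, best =>
    if pvExactHit lc then some c
    else if pvCand lc then
      pvBLoop rest (match best with
        | none => some c
        | some b => if PySem.Str.len c < PySem.Str.len b then some c else some b)
    else pvBLoop rest best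

def guess_investor_score_col_py_alt (columns : List String) : Option String :=
  pvBLoop (pvLowerMap columns).items none

-- ===== PRECONDITION & SPEC =====
def Spec_guess_investor_score_col_py (columns : List String) (out : Option String) : Prop := out = guess_investor_score_col_py_alt columns
instance (columns : List String) (out : Option String) : Decidable (Spec_guess_investor_score_col_py columns out) := by unfold Spec_guess_investor_score_col_py; infer_instance

-- ===== CLAIM (what is proved, stated in full; the proofs are below) =====
def Claim_equal_guess_investor_score_col_py : Prop := ∀ (columns : List String), Dom_guess_investor_score_col_py columns → Spec_guess_investor_score_col_py columns (guess_investor_score_col_py columns)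

-- ===== LEMMAS AND PROOFS =====
-- the running-minimum step B's accumulator performs
def pvMinStep (o : Option String) (c : String) : Option String :=
  match o with
  | none => some c
  | some b => if PySem.Str.len c < PySem.Str.len b then some c else some b

lemma pv_head?_insertBy (x : String) (l : List String) :
    (PySem.List.insertBy (fun a b => decide (PySem.Str.len a < PySem.Str.len b)) x l).head? =
      pvMinStep l.head? x := by
  cases l with
  | nil => rfl
  | cons y ys =>
    by_cases h : x.length < y.length <;>
      simp [PySem.List.insertBy, pvMinStep, h]

lemma pv_head?_foldl_insertBy :
    ∀ (xs acc : List String),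
      (xs.foldl (fun a x => PySem.List.insertBy (fun a b => decide (PySem.Str.len a < PySem.Str.len b)) x a) acc).head? =
        xs.foldl pvMinStep acc.head?
  | [], acc => rfl
  | x :: xs, acc => by
    simp only [List.foldl_cons]
    rw [pv_head?_foldl_insertBy xs, pv_head?_insertBy]

lemma pv_sorted_head? (cands : List String) :
    (PySem.List.sorted cands (fun x => PySem.Str.len x) false).head? =
      cands.foldl pvMinStep none := by
  rw [PySem.List.sorted_eq_foldl_insertBy]
  exact pv_head?_foldl_insertBy cands []

lemma pv_bLoop_eq :
    ∀ (items : List (String × String)) (best : Option String),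
      pvBLoop items best =
        match pvALoop items with
        | some c => some c
        | none => ((items.filter (fun p => pvCand p.2)).map (·.1)).foldl pvMinStep best
  | [], best => rfl
  | (c, lc) :: rest, best => by
    by_cases hx : pvExactHit lc
    · simp [pvBLoop, pvALoop, hx]
    · by_cases hc : pvCand lc
      · simp only [pvBLoop, pvALoop, hx, hc, if_true,
          pv_bLoop_eq rest, List.filter_cons, List.map_cons, List.foldl_cons]
        cases pvALoop rest <;> simp [pvMinStep]
      · simp [pvBLoop, pvALoop, hx, hc, pv_bLoop_eq rest]

-- ===== VERDICT (by name: the statement is the Claim_ definition above) =====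
theorem guess_investor_score_col_py_spec : Claim_equal_guess_investor_score_col_py := by
  intro columns _
  unfold Spec_guess_investor_score_col_py guess_investor_score_col_py guess_investor_score_col_py_alt
  rw [pv_bLoop_eq]
  cases h : pvALoop (pvLowerMap columns).items with
  | some c => simp [h]
  | none =>
    simp only [h]
    by_cases he :
        (((pvLowerMap columns).items.filter (fun p => pvCand p.2)).map (fun x => x.1)) = []
    · simp [he]
    · have he' :
          (((pvLowerMap columns).items.filter (fun p => pvCand p.2)).map (fun x => x.1)).isEmpty = false := by
        simpa [List.isEmpty_iff] using he
      simp only [he', Bool.false_eq_true, if_false]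
      exact pv_sorted_head? _
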